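-- pv_equiv track=rewrite | github.com/samtcmu/tf-tutorial | mnist.py | GetShiftRange
-- ===== SOURCE A (Python) =====
-- def GetShiftRange(pixels):
--     up = 0
--     for r in range(len(pixels)):
--         if any(pixels[r][c] != 0 for c in range(len(pixels[r]))):
--             break
--         up += 1
--
--     down = 0
--     for r in range(len(pixels) - 1, -1 , -1):
--         if any(pixels[r][c] != 0 for c in range(len(pixels[r]))):
--             break
--         down += 1
--
--     left = 0
--     for c in range(len(pixels[0])):
--         if any(pixels[r][c] != 0 for r in range(len(pixels))):
--             break
--         left += 1
--
--     right = 0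
--     for c in range(len(pixels[0]) - 1, -1, -1):
--         if any(pixels[r][c] != 0 for r in range(len(pixels))):
--             break
--         right += 1
--
--     return (-up, down), (-left, right)
-- ===== SOURCE B (Python) =====
-- def GetShiftRange(pixels):
--     nrows = len(pixels)
--     ncols = len(pixels[0])
--     rows = [r for r, row in enumerate(pixels) if any(x != 0 for x in row)]
--     cols = [c for c in range(ncols) if any(row[c] != 0 for row in pixels)]
--     row_range = (-rows[0], nrows - 1 - rows[-1]) if rows else (-nrows, nrows)
--     col_range = (-cols[0], ncols - 1 - cols[-1]) if cols else (-ncols, ncols)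
--     return row_range, col_range
-- ===== Notes on version B (the rewrite author's own statement) =====
-- stated objective: simpler
-- what changed: Replaces A's four directional break-scans (top, bottom over reversed rows, left, right over reversed columns) by building the row and column nonzero-index lists once and reading both borders of each axis off their first and last entries, with a per-axis arithmetic fallback for an all-zero axis.
-- outside the precondition, e.g. on GetShiftRange([[1, 0, 1], [0]]): A returns ((0, 1), (0, 0)), B raises IndexError; on GetShiftRange([]): A raises IndexError, B raises IndexError
import Mathlib
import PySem

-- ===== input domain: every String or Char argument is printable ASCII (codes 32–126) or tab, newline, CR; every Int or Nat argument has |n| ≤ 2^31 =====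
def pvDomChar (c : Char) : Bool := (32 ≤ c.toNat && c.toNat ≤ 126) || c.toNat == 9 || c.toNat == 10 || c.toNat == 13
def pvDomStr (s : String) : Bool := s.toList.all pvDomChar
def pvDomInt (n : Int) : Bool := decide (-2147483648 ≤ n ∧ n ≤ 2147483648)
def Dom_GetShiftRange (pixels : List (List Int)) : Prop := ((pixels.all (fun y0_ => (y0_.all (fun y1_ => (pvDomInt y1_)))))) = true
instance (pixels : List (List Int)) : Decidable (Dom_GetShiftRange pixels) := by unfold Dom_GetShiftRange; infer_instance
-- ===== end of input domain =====

-- B replaces A's four directional break-scans by row/column nonzero-index lists whose first/last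
-- entries give the borders, one per-axis arithmetic fallback for all-zero axes (objective: simpler).
-- Equivalence is claimed on Pre_ (exactly where both Pythons return); return value only, no mutation.

-- ===== PORT A =====
-- a loop counting leading elements until the first one satisfying p (A's `for … if …: break; cnt += 1`)
def pvTakeCount {α : Type} (p : α → Bool) : List α → Nat
  | [] => 0
  | x :: xs => if p x then 0 else pvTakeCount p xs + 1

-- `any(pixels[r][c] != 0 for c in range(len(pixels[r])))`
def pvRowNZ (row : List Int) : Bool := row.any (fun x => x != 0)

-- `any(pixels[r][c] != 0 for r in range(len(pixels)))`; `getD c 0` is exact inside Pre_: there the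
-- lazy Python scan meets no row shorter than c+1 before a nonzero, so skipping short rows as 0
-- gives the same truth value; where the scan hits a short row first, Python raises (outside Pre_)
def pvColNZ (pixels : List (List Int)) (c : Nat) : Bool :=
  pixels.any (fun row => row.getD c 0 != 0)

def GetShiftRange (pixels : List (List Int)) : (Int × Int) × (Int × Int) :=
  let up := pvTakeCount pvRowNZ pixels
  let down := pvTakeCount pvRowNZ pixels.reverse
  let m := (pixels.headD []).length   -- len(pixels[0]); Python raises IndexError on [] (outside Pre_)
  let left := pvTakeCount (pvColNZ pixels) (List.range m)
  let right := pvTakeCount (pvColNZ pixels) (List.range m).reverse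
  ((-(up : Int), (down : Int)), (-(left : Int), (right : Int)))

-- ===== PORT B =====
-- `[i for i, row in enumerate(pixels) if <flag>]` / `[c for c in range(ncols) if <flag>]`
def pvIdxOfTrue : Nat → List Bool → List Nat
  | _, [] => []
  | i, b :: bs => if b then i :: pvIdxOfTrue (i + 1) bs else pvIdxOfTrue (i + 1) bs

def GetShiftRange_alt (pixels : List (List Int)) : (Int × Int) × (Int × Int) :=
  let nrows := pixels.length
  let ncols := (pixels.headD []).length   -- len(pixels[0]); Python raises IndexError on [] (outside Pre_)
  let rows := pvIdxOfTrue 0 (pixels.map (fun row => row.any (fun x => x != 0)))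
  let cols := pvIdxOfTrue 0 ((List.range ncols).map (fun c => pixels.any (fun row => row.getD c 0 != 0)))
  let rowRange :=
    if rows = [] then (-(nrows : Int), (nrows : Int))
    else (-(rows.headD 0 : Int), (nrows : Int) - 1 - (rows.getLastD 0 : Int))
  let colRange :=
    if cols = [] then (-(ncols : Int), (ncols : Int))
    else (-(cols.headD 0 : Int), (ncols : Int) - 1 - (cols.getLastD 0 : Int))
  (rowRange, colRange)

-- ===== PRECONDITION & SPEC =====
-- Pre_ excludes the empty grid, where A (pixels[0]) raises IndexError, and grids where some lazy
-- column scan reaches a row shorter than the column index before any nonzero entry: there B raises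
-- IndexError, and A either raises too or returns only because its break skipped that column.
def Pre_GetShiftRange (pixels : List (List Int)) : Prop :=
  pixels ≠ [] ∧
  ∀ c < (pixels.headD []).length, ∀ r < pixels.length,
    (pixels.getD r []).length ≤ c → ∃ r' < r, (pixels.getD r' []).getD c 0 ≠ 0
instance (pixels : List (List Int)) : Decidable (Pre_GetShiftRange pixels) := by
  unfold Pre_GetShiftRange; infer_instance

def pvWitness_GetShiftRange : List (List Int) := [[0, 0], [0, 1]]

def Spec_GetShiftRange (pixels : List (List Int)) (out : (Int × Int) × (Int × Int)) : Prop := out = GetShiftRange_alt pixels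
instance (pixels : List (List Int)) (out : (Int × Int) × (Int × Int)) : Decidable (Spec_GetShiftRange pixels out) := by unfold Spec_GetShiftRange; infer_instance

-- ===== CLAIM (what is proved, stated in full; the proofs are below) =====
def Claim_equal_GetShiftRange : Prop := ∀ (pixels : List (List Int)), Dom_GetShiftRange pixels → Pre_GetShiftRange pixels → Spec_GetShiftRange pixels (GetShiftRange pixels)

-- ===== LEMMAS AND PROOFS =====

-- takeCount only looks at the truth values
theorem pvTakeCount_map {α : Type} (q : α → Bool) (l : List α) :
    pvTakeCount id (l.map q) = pvTakeCount q l := by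
  induction l with
  | nil => rfl
  | cons x xs ih => simp [pvTakeCount, ih]

theorem pvTakeCount_all_false (bs : List Bool) (h : ∀ b ∈ bs, b = false) :
    pvTakeCount id bs = bs.length := by
  induction bs with
  | nil => rfl
  | cons b bs ih =>
    have hb := h b (by simp)
    simp [pvTakeCount, hb, ih (fun x hx => h x (by simp [hx]))]

theorem pvTakeCount_lt (bs : List Bool) (h : ∃ b ∈ bs, b = true) :
    pvTakeCount id bs < bs.length := by
  induction bs with
  | nil => simp at h
  | cons b bs ih =>
    by_cases hb : b = true
    · simp [pvTakeCount, hb]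
    · have hb' : b = false := by simpa using hb
      have : ∃ x ∈ bs, x = true := by
        rcases h with ⟨x, hx, hxt⟩
        rcases List.mem_cons.1 hx with h1 | h2
        · exact absurd (h1 ▸ hxt) hb
        · exact ⟨x, h2, hxt⟩
      simpa [pvTakeCount, hb'] using Nat.succ_lt_succ (ih this)

theorem pvIdxOfTrue_nil_iff (i : Nat) (bs : List Bool) :
    pvIdxOfTrue i bs = [] ↔ ∀ b ∈ bs, b = false := by
  induction bs generalizing i with
  | nil => simp [pvIdxOfTrue]
  | cons b bs ih =>
    by_cases hb : b = true
    · simp [pvIdxOfTrue, hb]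
    · have hb' : b = false := by simpa using hb
      simp [pvIdxOfTrue, hb', ih (i + 1)]

theorem pvIdxOfTrue_head (i : Nat) (bs : List Bool) (h : ∃ b ∈ bs, b = true) :
    (pvIdxOfTrue i bs).headD 0 = i + pvTakeCount id bs := by
  induction bs generalizing i with
  | nil => simp at h
  | cons b bs ih =>
    by_cases hb : b = true
    · simp [pvIdxOfTrue, pvTakeCount, hb]
    · have hb' : b = false := by simpa using hb
      have hex : ∃ x ∈ bs, x = true := by
        rcases h with ⟨x, hx, hxt⟩
        rcases List.mem_cons.1 hx with h1 | h2
        · exact absurd (h1 ▸ hxt) hb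
        · exact ⟨x, h2, hxt⟩
      have e1 : pvIdxOfTrue i (b :: bs) = pvIdxOfTrue (i + 1) bs := by
        simp [pvIdxOfTrue, hb']
      have e2 : pvTakeCount id (b :: bs) = pvTakeCount id bs + 1 := by
        simp [pvTakeCount, hb']
      rw [e1, e2, ih (i + 1) hex]
      omega

theorem pvIdxOfTrue_append (i : Nat) (xs ys : List Bool) :
    pvIdxOfTrue i (xs ++ ys) = pvIdxOfTrue i xs ++ pvIdxOfTrue (i + xs.length) ys := by
  induction xs generalizing i with
  | nil => simp [pvIdxOfTrue]
  | cons b bs ih =>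
    by_cases hb : b = true
    · simp [pvIdxOfTrue, hb, ih (i + 1)]
      ring_nf
    · have hb' : b = false := by simpa using hb
      simp [pvIdxOfTrue, hb', ih (i + 1)]
      ring_nf

theorem pvIdxOfTrue_getLast (bs : List Bool) (h : ∃ b ∈ bs, b = true) :
    (pvIdxOfTrue 0 bs).getLastD 0 = bs.length - 1 - pvTakeCount id bs.reverse := by
  induction bs using List.reverseRecOn with
  | nil => simp at h
  | append_singleton bs b ih =>
    rw [pvIdxOfTrue_append]
    by_cases hb : b = true
    · simp [pvIdxOfTrue, hb, pvTakeCount]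
    · have hb' : b = false := by simpa using hb
      have hex : ∃ x ∈ bs, x = true := by
        rcases h with ⟨x, hx, hxt⟩
        rcases List.mem_append.1 hx with h1 | h2
        · exact ⟨x, h1, hxt⟩
        · simp at h2; exact absurd (h2 ▸ hxt) hb
      have e1 : pvIdxOfTrue (0 + bs.length) [b] = [] := by
        simp [pvIdxOfTrue, hb']
      rw [e1, List.append_nil]
      have e2 : pvTakeCount id (bs ++ [b]).reverse = pvTakeCount id bs.reverse + 1 := by
        simp [List.reverse_append, pvTakeCount, hb']
      have e3 : pvTakeCount id bs.reverse < bs.length := by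
        have hr : ∃ x ∈ bs.reverse, x = true := by
          rcases hex with ⟨x, hx, ht⟩; exact ⟨x, List.mem_reverse.2 hx, ht⟩
        simpa using pvTakeCount_lt _ hr
      rw [e2, ih hex, List.length_append]
      simp only [List.length_singleton]
      omega

-- one axis of B (index list, first/last, fallback) equals the same axis of A (two break-scans)
theorem pvAxis_eq (bs : List Bool) :
    (if pvIdxOfTrue 0 bs = [] then (-(bs.length : Int), (bs.length : Int))
     else (-((pvIdxOfTrue 0 bs).headD 0 : Int),
           (bs.length : Int) - 1 - ((pvIdxOfTrue 0 bs).getLastD 0 : Int)))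
    = (-(pvTakeCount id bs : Int), (pvTakeCount id bs.reverse : Int)) := by
  by_cases h : pvIdxOfTrue 0 bs = []
  · have hall := (pvIdxOfTrue_nil_iff 0 bs).1 h
    have hrall : ∀ b ∈ bs.reverse, b = false := fun b hb => hall b (List.mem_reverse.1 hb)
    rw [if_pos h, pvTakeCount_all_false bs hall, pvTakeCount_all_false _ hrall,
      List.length_reverse]
  · have hex : ∃ b ∈ bs, b = true := by
      by_contra hno
      push Not at hno
      exact h ((pvIdxOfTrue_nil_iff 0 bs).2 fun b hb => by simpa using hno b hb)
    have hrex : ∃ b ∈ bs.reverse, b = true := by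
      rcases hex with ⟨x, hx, ht⟩; exact ⟨x, List.mem_reverse.2 hx, ht⟩
    have hlt : pvTakeCount id bs.reverse < bs.length := by
      simpa using pvTakeCount_lt _ hrex
    rw [if_neg h, pvIdxOfTrue_head 0 bs hex, pvIdxOfTrue_getLast bs hex]
    refine Prod.ext (by simp) ?_
    simp only []
    omega

-- ===== VERDICT (by name: the statement is the Claim_ definition above) =====
theorem GetShiftRange_spec : Claim_equal_GetShiftRange := by
  intro pixels _ _
  unfold Spec_GetShiftRange GetShiftRange GetShiftRange_alt
  simp only []
  set m := (pixels.headD []).length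
  have hrow : pixels.map (fun row => row.any (fun x => x != 0)) = pixels.map pvRowNZ := rfl
  have hcol : (List.range m).map (fun c => pixels.any (fun row => row.getD c 0 != 0))
      = (List.range m).map (pvColNZ pixels) := rfl
  rw [hrow, hcol]
  have hA := pvAxis_eq (pixels.map pvRowNZ)
  have hB := pvAxis_eq ((List.range m).map (pvColNZ pixels))
  rw [List.length_map] at hA
  rw [List.length_map, List.length_range] at hB
  rw [pvTakeCount_map, ← List.map_reverse, pvTakeCount_map] at hA hB
  rw [← hA, ← hB]
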